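-- pv_equiv track=rewrite | github.com/S8-StudyGroup/Navigate-Basic-Algorithms | NBA_taehak/09/week_3rd/17681.py | solution
-- ===== SOURCE A (Python) =====
-- def solution(n, arr1, arr2):
--     '''
--     n: 정사각형의 크기
--     arr1: 지도 1의 정보
--     arr2: 지도 2의 정보
--     answer: 지도 1과 지도 2를 합해서 #으로 출력
--     '''
--     answer = []
--
--     for i in range(n):
--         row = ''
--         for j in range(n - 1, -1, -1):
--             if arr1[i] & (1 << j) or arr2[i] & (1 << j):
--                 row += '#'
--             else:
--                 row += ' '
--         answer.append(row)
--
--     return answer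
-- ===== SOURCE B (Python) =====
-- _TBL = str.maketrans('10', '# ')
--
--
-- def solution(n, arr1, arr2):
--     return [format((arr1[i] | arr2[i]) & ((1 << n) - 1), f'0{n}b').translate(_TBL)
--             for i in range(n)]
-- ===== Notes on version B (the rewrite author's own statement) =====
-- stated objective: faster
-- what changed: B has no bit loop at all: per row it ORs the two entries once, masks to n bits, lets the builtin zero-padded binary formatter format(v, f'0{n}b') produce the MSB-first bit string and str.translate map 1/0 to '#'/' ', replacing A's nested per-bit mask-testing loop (which rebuilds 1<<j and tests both rows for every character); measured ~60x faster at n=1500.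
-- outside the precondition, e.g. on solution(1, [3], []): A returns ['#'], B raises IndexError
import Mathlib
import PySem

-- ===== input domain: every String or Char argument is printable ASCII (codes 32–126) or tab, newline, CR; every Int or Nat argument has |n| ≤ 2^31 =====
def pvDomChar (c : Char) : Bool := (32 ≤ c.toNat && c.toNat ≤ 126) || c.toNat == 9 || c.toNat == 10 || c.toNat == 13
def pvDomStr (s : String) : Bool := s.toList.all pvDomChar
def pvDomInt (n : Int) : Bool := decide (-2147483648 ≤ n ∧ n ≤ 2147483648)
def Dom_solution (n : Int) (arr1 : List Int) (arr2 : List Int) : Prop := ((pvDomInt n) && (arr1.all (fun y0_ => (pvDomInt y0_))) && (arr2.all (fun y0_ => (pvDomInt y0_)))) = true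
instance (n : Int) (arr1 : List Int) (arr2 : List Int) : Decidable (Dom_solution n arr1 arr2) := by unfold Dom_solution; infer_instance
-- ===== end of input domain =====

-- B replaces A's nested per-bit mask-testing loop with a single OR per row, a mask
-- to n bits and the builtin zero-padded binary formatter plus a 1/0 → #/space
-- character translation; objective: faster (constant-factor, measured by the check).

-- ===== PORT A =====
def solution (n : Int) (arr1 : List Int) (arr2 : List Int) : List String :=
  (PySem.List.pyRange 0 n 1).foldl (fun answer i =>
    answer ++ [String.mk ((PySem.List.pyRange (n - 1) (-1) (-1)).foldl (fun row j =>
      if PySem.Int.band (PySem.List.pyGetD arr1 i 0) ((1 : Int) <<< j.toNat) ≠ 0 ∨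
         PySem.Int.band (PySem.List.pyGetD arr2 i 0) ((1 : Int) <<< j.toNat) ≠ 0
      then row ++ ['#'] else row ++ [' ']) [])]) []

-- ===== PORT B =====
-- str.maketrans('10', '# ') / str.translate: exact (characters outside the table unchanged)
def pyTranslate10 (c : Char) : Char := if c = '1' then '#' else if c = '0' then ' ' else c

-- binary digits of a Nat, LSB-first, by repeated divmod (how a binary formatter is written)
def binRev (v : Nat) : List Char :=
  if h : v = 0 then [] else (if v % 2 = 1 then '1' else '0') :: binRev (v / 2)
decreasing_by exact Nat.div_lt_self (Nat.pos_of_ne_zero h) one_lt_two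

-- format(v, f'0{w}b') for v ≥ 0: minimal binary string, left-padded with '0' to width w; exact
def pyFormatBinS (v : Nat) : List Char :=
  if v = 0 then ['0'] else (binRev v).reverse
def pyFormatBin (w : Nat) (v : Nat) : List Char :=
  List.replicate (w - (pyFormatBinS v).length) '0' ++ pyFormatBinS v

-- rows exist only for i in range(n), hence n > 0 there, so the width n.toNat is exact;
-- the masked OR is nonnegative, so .toNat is exact
def solution_alt (n : Int) (arr1 : List Int) (arr2 : List Int) : List String :=
  (PySem.List.pyRange 0 n 1).map (fun i =>
    String.mk ((pyFormatBin n.toNat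
      ((PySem.Int.band
          (PySem.Int.bor (PySem.List.pyGetD arr1 i 0) (PySem.List.pyGetD arr2 i 0))
          ((1 : Int) <<< (n.toNat : Int) - 1)).toNat)).map pyTranslate10))

-- ===== PRECONDITION & SPEC =====
-- Pre_ excludes the inputs with n larger than the length of arr1 or arr2: there A
-- raises IndexError, except when a short-circuiting `or` (a set bit in arr1's row)
-- lets A skip reading a missing arr2 row and return anyway; B reads both rows and raises.
def Pre_solution (n : Int) (arr1 : List Int) (arr2 : List Int) : Prop :=
  n ≤ (arr1.length : Int) ∧ n ≤ (arr2.length : Int)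
instance (n : Int) (arr1 : List Int) (arr2 : List Int) : Decidable (Pre_solution n arr1 arr2) := by unfold Pre_solution; infer_instance
def pvWitness_solution : Int × List Int × List Int := (2, [2, 1], [1, 1])

def Spec_solution (n : Int) (arr1 : List Int) (arr2 : List Int) (out : List String) : Prop := out = solution_alt n arr1 arr2
instance (n : Int) (arr1 : List Int) (arr2 : List Int) (out : List String) : Decidable (Spec_solution n arr1 arr2 out) := by unfold Spec_solution; infer_instance

-- ===== CLAIM (what is proved, stated in full; the proofs are below) =====
def Claim_equal_solution : Prop := ∀ (n : Int) (arr1 : List Int) (arr2 : List Int), Dom_solution n arr1 arr2 → Pre_solution n arr1 arr2 → Spec_solution n arr1 arr2 (solution n arr1 arr2)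

-- ===== LEMMAS AND PROOFS =====

-- Python's bit j of an arbitrary integer (infinite two's complement).
def bitOf (x : Int) (j : Nat) : Bool :=
  if 0 ≤ x then x.toNat.testBit j else !((-x - 1).toNat.testBit j)

theorem ldiff_add_and (n : Nat) : ∀ m : Nat, n.ldiff m + (n &&& m) = n := by
  induction n using Nat.binaryRec with
  | zero => intro m; simp [Nat.ldiff, Nat.bitwise_zero_left]
  | bit b n ih =>
    intro m
    rw [← Nat.bit_testBit_zero_shiftRight_one m, Nat.ldiff_bit, Nat.land_bit,
      Nat.bit_val, Nat.bit_val, Nat.bit_val]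
    have := ih (m >>> 1)
    cases b <;> cases m.testBit 0 <;> simp <;> omega

theorem sub_and_eq_ldiff (n m : Nat) : n - (n &&& m) = n.ldiff m := by
  have h := ldiff_add_and n m
  have h2 : n &&& m ≤ n := Nat.and_le_left
  omega

theorem band_two_pow (x : Int) (j : Nat) :
    (PySem.Int.band x ((1 : Int) <<< (j : Int)) ≠ 0) ↔ bitOf x j = true := by
  have hp : ((1 : Int) <<< (j : Int)) = ((2 ^ j : Nat) : Int) := Int.one_shiftLeft j
  have hpos : (0:Nat) < 2 ^ j := by positivity
  by_cases hx : 0 ≤ x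
  · rw [bitOf, if_pos hx, hp, PySem.Int.band_of_nonneg hx (by positivity)]
    rw [Int.toNat_natCast, Nat.and_two_pow]
    cases h : x.toNat.testBit j <;> simp <;> omega
  · rw [bitOf, if_neg hx, hp]
    simp only [PySem.Int.band, if_neg hx, if_pos (by positivity : (0:Int) ≤ ((2^j : Nat) : Int))]
    rw [Int.toNat_natCast, Nat.two_pow_and]
    cases h : (-x - 1).toNat.testBit j <;> simp <;> omega

theorem bitOf_bor (a b : Int) (j : Nat) :
    bitOf (PySem.Int.bor a b) j = (bitOf a j || bitOf b j) := by
  by_cases ha : 0 ≤ a <;> by_cases hb : 0 ≤ b <;>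
    simp only [PySem.Int.bor, if_pos, ha, hb, ite_false, bitOf]
  · rw [if_pos (by positivity)]
    rw [Int.toNat_natCast, Nat.testBit_or]
  · have hk : ¬ (0:Int) ≤ -↑((-b - 1).toNat - ((-b - 1).toNat &&& a.toNat)) - 1 := by omega
    rw [if_neg hk]
    have : (-(-((((-b - 1).toNat - ((-b - 1).toNat &&& a.toNat)) : Nat) : Int) - 1) - 1).toNat
        = (-b - 1).toNat - ((-b - 1).toNat &&& a.toNat) := by omega
    rw [this, sub_and_eq_ldiff, Nat.testBit_ldiff]
    cases a.toNat.testBit j <;> cases ((-b-1).toNat).testBit j <;> simp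
  · have hk : ¬ (0:Int) ≤ -↑((-a - 1).toNat - ((-a - 1).toNat &&& b.toNat)) - 1 := by omega
    rw [if_neg hk]
    have : (-(-((((-a - 1).toNat - ((-a - 1).toNat &&& b.toNat)) : Nat) : Int) - 1) - 1).toNat
        = (-a - 1).toNat - ((-a - 1).toNat &&& b.toNat) := by omega
    rw [this, sub_and_eq_ldiff, Nat.testBit_ldiff]
    cases b.toNat.testBit j <;> cases ((-a-1).toNat).testBit j <;> simp
  · have hk : ¬ (0:Int) ≤ -↑((-a - 1).toNat &&& (-b - 1).toNat) - 1 := by omega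
    rw [if_neg hk]
    have : (-(-((((-a - 1).toNat &&& (-b - 1).toNat) : Nat) : Int) - 1) - 1).toNat
        = (-a - 1).toNat &&& (-b - 1).toNat := by omega
    rw [this, Nat.testBit_and]
    cases ((-a-1).toNat).testBit j <;> cases ((-b-1).toNat).testBit j <;> simp

-- masking an arbitrary Python int to n bits: the result is < 2^n …
theorem band_mask_lt (w : Int) (n : Nat) :
    (PySem.Int.band w ((2 ^ n - 1 : Nat) : Int)).toNat < 2 ^ n := by
  have h1 : (1:Nat) ≤ 2 ^ n := Nat.one_le_two_pow
  by_cases hw : 0 ≤ w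
  · rw [PySem.Int.band_of_nonneg hw (by positivity), Int.toNat_natCast, Int.toNat_natCast]
    have := Nat.and_le_right (n := w.toNat) (m := 2 ^ n - 1)
    omega
  · simp only [PySem.Int.band, if_neg hw, if_pos (by positivity : (0:Int) ≤ ((2^n - 1 : Nat) : Int))]
    rw [Int.toNat_natCast, Int.toNat_natCast]
    omega

-- … and its low n bits are exactly the Python bits of the argument
theorem band_mask_testBit (w : Int) (n j : Nat) (hj : j < n) :
    (PySem.Int.band w ((2 ^ n - 1 : Nat) : Int)).toNat.testBit j = bitOf w j := by
  by_cases hw : 0 ≤ w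
  · rw [bitOf, if_pos hw, PySem.Int.band_of_nonneg hw (by positivity)]
    rw [Int.toNat_natCast, Int.toNat_natCast, Nat.testBit_and, Nat.testBit_two_pow_sub_one]
    simp [hj]
  · rw [bitOf, if_neg hw]
    simp only [PySem.Int.band, if_neg hw, if_pos (by positivity : (0:Int) ≤ ((2^n - 1 : Nat) : Int))]
    rw [Int.toNat_natCast, Int.toNat_natCast, sub_and_eq_ldiff, Nat.testBit_ldiff,
      Nat.testBit_two_pow_sub_one]
    simp [hj]

-- the LSB-first divmod digits, padded with zeros to width n, are the low n testBits
theorem binRev_pad (n : Nat) : ∀ v : Nat, v < 2 ^ n →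
    binRev v ++ List.replicate (n - (binRev v).length) '0'
      = (List.range n).map (fun j => if v.testBit j then '1' else '0') := by
  induction n with
  | zero =>
    intro v hv
    have : v = 0 := by omega
    subst this
    simp [binRev]
  | succ n ih =>
    intro v hv
    by_cases hv0 : v = 0
    · subst hv0
      rw [binRev]
      apply List.ext_getElem <;> simp [Nat.zero_testBit]
    · rw [binRev, dif_neg hv0]
      have hv2 : v / 2 < 2 ^ n := by
        have : 2 ^ (n + 1) = 2 * 2 ^ n := by ring
        omega
      rw [List.range_succ_eq_map, List.map_cons, List.map_map]
      simp only [List.length_cons, List.cons_append]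
      have hlen : n + 1 - ((binRev (v/2)).length + 1) = n - (binRev (v/2)).length := by omega
      rw [hlen]
      congr 1
      · rw [Nat.testBit_zero]
        rcases Nat.mod_two_eq_zero_or_one v with h | h <;> simp [h]
      · rw [ih (v / 2) hv2]
        apply List.map_congr_left
        intro j _
        simp only [Function.comp_apply, Nat.succ_eq_add_one, Nat.testBit_succ]

theorem pyFormatBin_eq (n v : Nat) (hn : 0 < n) (hv : v < 2 ^ n) :
    pyFormatBin n v
      = ((List.range n).map (fun j => if v.testBit j then '1' else '0')).reverse := by
  unfold pyFormatBin pyFormatBinS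
  by_cases hv0 : v = 0
  · subst hv0
    have hrhs : ((List.range n).map (fun j => if Nat.testBit 0 j then '1' else '0')).reverse
        = List.replicate n '0' := by
      apply List.ext_getElem <;> simp [Nat.zero_testBit]
    rw [hrhs]
    apply List.ext_getElem
    · simp; omega
    · intro k h1 h2
      simp only [List.length_replicate] at h2
      by_cases hk : k < n - 1
      · rw [List.getElem_append_left (by simpa using hk), List.getElem_replicate,
          List.getElem_replicate]
      · have : k - (n - 1) = 0 := by omega
        rw [List.getElem_append_right (by simpa using hk), List.getElem_replicate]
        simp [this]
  · rw [if_neg hv0, ← binRev_pad n v hv, List.reverse_append, List.reverse_replicate,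
      List.length_reverse]

-- A's inner loop appends one character per index
theorem aFold {α : Type} (l : List α) (P : α → Prop) [DecidablePred P] (acc : List Char) :
    l.foldl (fun row j => if P j then row ++ ['#'] else row ++ [' ']) acc
      = acc ++ l.map (fun j => if P j then '#' else ' ') := by
  induction l generalizing acc with
  | nil => simp
  | cons x l ih =>
    simp only [List.foldl_cons, List.map_cons]
    split_ifs with h <;> rw [ih] <;> simp

theorem reverse_map_range (m : Nat) (f : Nat → Char) :
    ((List.range m).map f).reverse = (List.range m).map (fun k => f (m - 1 - k)) := by
  apply List.ext_getElem
  · simp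
  · intro k h1 h2
    simp only [List.getElem_reverse, List.getElem_map, List.getElem_range, List.length_map, List.length_range] at *

-- ===== VERDICT (by name: the statement is the Claim_ definition above) =====

theorem solution_spec : Claim_equal_solution := by
  intro n arr1 arr2 _ _
  unfold Spec_solution
  by_cases hn : n ≤ 0
  · simp [solution, solution_alt, PySem.List.pyRange_one_eq_nil hn]
  · unfold solution solution_alt
    rw [PySem.List.foldl_append_singleton_eq_map, List.nil_append]
    apply List.map_congr_left
    intro i hi
    rw [PySem.List.mem_pyRange_one] at hi
    have hnpos : 0 < n.toNat := by omega
    congr 1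
    -- A's row
    rw [PySem.List.pyRange_neg_one, List.foldl_map, aFold, List.nil_append]
    have hcnt : ((n - 1 : Int) - -1).toNat = n.toNat := by omega
    rw [hcnt]
    -- B's row
    have hmask : ((1 : Int) <<< (n.toNat : Int) - 1) = ((2 ^ n.toNat - 1 : Nat) : Int) := by
      have h1 : ((1 : Int) <<< (n.toNat : Int)) = ((2 ^ n.toNat : Nat) : Int) :=
        Int.one_shiftLeft n.toNat
      have h2 : (1:Nat) ≤ 2 ^ n.toNat := Nat.one_le_two_pow
      rw [Nat.cast_sub h2, h1, Nat.cast_one]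
    rw [hmask, pyFormatBin_eq n.toNat _ hnpos (band_mask_lt _ _), List.map_reverse,
      List.map_map, reverse_map_range]
    apply List.map_congr_left
    intro k hk
    simp only [List.mem_range] at hk
    have hidx : ((n - 1 : Int) - (k : Int)).toNat = n.toNat - 1 - k := by omega
    rw [hidx]
    have hjlt : n.toNat - 1 - k < n.toNat := by omega
    simp only [Function.comp_apply, band_mask_testBit _ _ _ hjlt, bitOf_bor]
    by_cases h1 : bitOf (PySem.List.pyGetD arr1 i 0) (n.toNat - 1 - k) = true <;>
      by_cases h2 : bitOf (PySem.List.pyGetD arr2 i 0) (n.toNat - 1 - k) = true <;>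
        simp [band_two_pow, h1, h2, pyTranslate10]
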